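-- pv_equiv track=rewrite | github.com/tca19/advent-of-code | day16/day16.py | programs_dance
-- ===== SOURCE A (Python) =====
-- def programs_dance(moves, programs):
--     """Make the programs dance according to the moves sequence. Return the list
--     of programs after the dance."""
--
--     for move in moves:
--         if move[0] == "s":
--             x = int(move[1:])
--             programs = programs[-x:] + programs[:-x]
--         if move[0] == "x":
--             A, B = move[1:].split("/")
--             A, B = int(A), int(B)
--             programs[A], programs[B] = programs[B], programs[A]
--         if move[0] == "p":
--             A, B = move[1:].split("/")
--             A, B = programs.index(A), programs.index(B)
--             programs[A], programs[B] = programs[B], programs[A]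
--
--     return "".join(programs)
-- ===== SOURCE B (Python) =====
-- def programs_dance(moves, programs):
--     """Make the programs dance according to the moves sequence. Return the list
--     of programs after the dance.
--
--     Instead of rebuilding the list on every spin, keep the list unrotated and
--     track the accumulated rotation offset; apply the rotation once at the end.
--     Exchanges translate logical indices to physical ones through the offset;
--     partner swaps are position-independent, so they work on the unrotated list.
--     """
--     xs = list(programs)
--     off = 0
--     for move in moves:
--         head, rest = move[0], move[1:]
--         if head == "s":
--             off += int(rest)
--         elif head == "x":
--             a, b = rest.split("/")
--             n = len(xs)
--             i = (int(a) - off) % n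
--             j = (int(b) - off) % n
--             xs[i], xs[j] = xs[j], xs[i]
--         elif head == "p":
--             a, b = rest.split("/")
--             i, j = xs.index(a), xs.index(b)
--             xs[i], xs[j] = xs[j], xs[i]
--     if xs:
--         k = off % len(xs)
--         if k:
--             xs = xs[-k:] + xs[:-k]
--     return "".join(xs)
-- ===== Notes on version B (the rewrite author's own statement) =====
-- stated objective: alternative
-- what changed: Instead of rebuilding the list with slicing on every spin move, B keeps the list unrotated and accumulates a rotation offset, translating exchange indices through the offset and applying the rotation once at the end (partner swaps are position-independent).
-- outside the precondition, e.g. on programs_dance(['s5'], ['a', 'b']): A returns 'ab', B returns 'ba'; on programs_dance(['s1', 'pa/b'], ['a', 'b', 'a']): A returns 'baa', B returns 'aba'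
import Mathlib
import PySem

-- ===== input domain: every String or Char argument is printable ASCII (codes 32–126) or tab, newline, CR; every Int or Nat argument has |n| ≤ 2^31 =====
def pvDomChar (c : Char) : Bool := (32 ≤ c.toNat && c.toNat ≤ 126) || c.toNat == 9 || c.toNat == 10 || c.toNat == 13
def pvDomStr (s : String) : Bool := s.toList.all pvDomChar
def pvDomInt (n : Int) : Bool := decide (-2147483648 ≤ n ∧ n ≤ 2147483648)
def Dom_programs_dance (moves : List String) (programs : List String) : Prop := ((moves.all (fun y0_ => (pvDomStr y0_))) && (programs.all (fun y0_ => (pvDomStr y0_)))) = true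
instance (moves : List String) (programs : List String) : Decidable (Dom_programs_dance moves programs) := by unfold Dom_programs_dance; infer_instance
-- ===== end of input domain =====

-- B replaces A's per-spin list rebuilding by a single accumulated rotation offset applied
-- once at the end (exchanges are translated through the offset, partner swaps act on the
-- unrotated list); objective: alternative algorithm (same measured cost on the tested inputs).

-- ===== PORT A =====
-- shared with port B: move[1:], move[0] == c, and the swap idiom ps[i], ps[j] = ps[j], ps[i]
def pvRest (move : String) : String := PySem.Str.slice move (some 1) none

def pvHeadIs (move : String) (c : Char) : Bool := PySem.Str.pyGet? move 0 == some c

def pvSwapPy (ps : List String) (i j : Int) : List String :=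
  PySem.List.pySetD (PySem.List.pySetD ps i (PySem.List.pyGetD ps j ""))
    j (PySem.List.pyGetD ps i "")

def pvSpinA (ps : List String) (move : String) : List String :=
  if pvHeadIs move 's' then
    match PySem.Int.ofStr? (pvRest move) with
    | some x => PySem.List.slice ps (some (-x)) none ++ PySem.List.slice ps none (some (-x))
    | none => ps
  else ps

def pvExchA (ps : List String) (move : String) : List String :=
  if pvHeadIs move 'x' then
    match PySem.Str.split? (pvRest move) "/" with
    | some [a, b] =>
      match PySem.Int.ofStr? a, PySem.Int.ofStr? b with
      | some A, some B => pvSwapPy ps A B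
      | _, _ => ps
    | _ => ps
  else ps

def pvPartA (ps : List String) (move : String) : List String :=
  if pvHeadIs move 'p' then
    match PySem.Str.split? (pvRest move) "/" with
    | some [a, b] =>
      match PySem.List.index? ps a, PySem.List.index? ps b with
      | some i, some j => pvSwapPy ps (i : Int) (j : Int)
      | _, _ => ps
    | _ => ps
  else ps

-- one iteration of A's loop body: the three `if`s in sequence
def pvStepA (ps : List String) (move : String) : List String :=
  pvPartA (pvExchA (pvSpinA ps move) move) move

def programs_dance (moves : List String) (programs : List String) : String :=
  PySem.Str.join "" (List.foldl pvStepA programs moves)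

-- ===== PORT B =====
def pvStepB (st : Int × List String) (move : String) : Int × List String :=
  if pvHeadIs move 's' then
    match PySem.Int.ofStr? (pvRest move) with
    | some x => (st.1 + x, st.2)
    | none => st
  else if pvHeadIs move 'x' then
    match PySem.Str.split? (pvRest move) "/" with
    | some [a, b] =>
      match PySem.Int.ofStr? a, PySem.Int.ofStr? b with
      | some A, some B =>
        match PySem.Int.mod? (A - st.1) (st.2.length : Int), PySem.Int.mod? (B - st.1) (st.2.length : Int) with
        | some i, some j => (st.1, pvSwapPy st.2 i j)
        | _, _ => st
      | _, _ => st
    | _ => st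
  else if pvHeadIs move 'p' then
    match PySem.Str.split? (pvRest move) "/" with
    | some [a, b] =>
      match PySem.List.index? st.2 a, PySem.List.index? st.2 b with
      | some i, some j => (st.1, pvSwapPy st.2 (i : Int) (j : Int))
      | _, _ => st
    | _ => st
  else st

def programs_dance_alt (moves : List String) (programs : List String) : String :=
  let st := List.foldl pvStepB (0, programs) moves
  let xs := st.2
  let xs2 := if xs.isEmpty then xs
    else
      let k := PySem.Int.mod st.1 (xs.length : Int)
      if k ≠ 0 then
        PySem.List.slice xs (some (-k)) none ++ PySem.List.slice xs none (some (-k))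
      else xs
  PySem.Str.join "" xs2

-- ===== PRECONDITION & SPEC =====
def pvMoveOK (programs : List String) (move : String) : Bool :=
  (PySem.Str.pyGet? move 0).isSome &&
  (if pvHeadIs move 's' then
    match PySem.Int.ofStr? (pvRest move) with
    | some x => decide (-(programs.length : Int) ≤ x ∧ x ≤ (programs.length : Int))
    | none => false
  else if pvHeadIs move 'x' then
    match PySem.Str.split? (pvRest move) "/" with
    | some [a, b] =>
      match PySem.Int.ofStr? a, PySem.Int.ofStr? b with
      | some A, some B => decide (-(programs.length : Int) ≤ A ∧ A < (programs.length : Int) ∧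
          -(programs.length : Int) ≤ B ∧ B < (programs.length : Int))
      | _, _ => false
    | _ => false
  else if pvHeadIs move 'p' then
    match PySem.Str.split? (pvRest move) "/" with
    | some [a, b] => programs.contains a && programs.contains b
    | _ => false
  else true)

-- Pre_ admits every input on which A returns, except two corners where A's value is an
-- accident of its implementation and B's differs: spin amounts with |x| > len(programs)
-- (A's slice arithmetic then performs NO rotation, where B rotates by x mod n), and
-- partner moves on a programs list with duplicate names (which name occurrence
-- .index picks then depends on the current rotation, an artefact of A's representation).
def Pre_programs_dance (moves : List String) (programs : List String) : Prop :=
  (∀ move ∈ moves, pvMoveOK programs move = true) ∧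
  ((moves.any fun m => pvHeadIs m 'p') = true → programs.Nodup)

instance (moves : List String) (programs : List String) : Decidable (Pre_programs_dance moves programs) := by
  unfold Pre_programs_dance; infer_instance

def pvWitness_programs_dance : List String × List String :=
  (["s1", "x0/2", "pb/c", "noop", "s-2"], ["a", "b", "c"])

def Spec_programs_dance (moves : List String) (programs : List String) (out : String) : Prop := out = programs_dance_alt moves programs
instance (moves : List String) (programs : List String) (out : String) : Decidable (Spec_programs_dance moves programs out) := by unfold Spec_programs_dance; infer_instance

-- ===== CLAIM (what is proved, stated in full; the proofs are below) =====
def Claim_equal_programs_dance : Prop := ∀ (moves : List String) (programs : List String), Dom_programs_dance moves programs → Pre_programs_dance moves programs → Spec_programs_dance moves programs (programs_dance moves programs)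

-- ===== LEMMAS AND PROOFS =====

-- `pvRot off xs` is the list xs rotated right by `off mod len(xs)` (Python's
-- `xs[-k:] + xs[:-k]` with k = off % len(xs)).
def pvRotK (off : Int) (n : Nat) : Nat := (off % (n : Int)).toNat

def pvRot {α : Type} (off : Int) (xs : List α) : List α :=
  xs.drop (xs.length - pvRotK off xs.length) ++ xs.take (xs.length - pvRotK off xs.length)

-- the (simultaneous-assignment) swap of positions i and j, in Nat-index form
def pvSwapN {α : Type} (xs : List α) (i j : Nat) (d : α) : List α :=
  (xs.set i (xs.getD j d)).set j (xs.getD i d)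

theorem pvRotK_lt (off : Int) {n : Nat} (hn : 0 < n) : pvRotK off n < n := by
  unfold pvRotK
  have h1 : 0 ≤ off % (n : Int) := Int.emod_nonneg off (by omega)
  have h2 : off % (n : Int) < (n : Int) := Int.emod_lt_of_pos off (by exact_mod_cast hn)
  omega

theorem length_pvRot {α : Type} (off : Int) (xs : List α) : (pvRot off xs).length = xs.length := by
  simp only [pvRot, List.length_append, List.length_drop, List.length_take]
  omega

theorem getElem_pvRot_lo {α : Type} (off : Int) (xs : List α) (i : Nat)
    (hi : i < pvRotK off xs.length) (hk : pvRotK off xs.length ≤ xs.length) :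
    (pvRot off xs)[i]'(by rw [length_pvRot]; omega) = xs[xs.length - pvRotK off xs.length + i]'(by omega) := by
  unfold pvRot
  rw [List.getElem_append]
  have hlen : (xs.drop (xs.length - pvRotK off xs.length)).length = pvRotK off xs.length := by
    simp; omega
  rw [dif_pos (by omega)]
  simp only [List.getElem_drop]

theorem getElem_pvRot_hi {α : Type} (off : Int) (xs : List α) (i : Nat)
    (h1 : pvRotK off xs.length ≤ i) (h2 : i < xs.length) :
    (pvRot off xs)[i]'(by rw [length_pvRot]; omega) = xs[i - pvRotK off xs.length]'(by omega) := by
  unfold pvRot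
  rw [List.getElem_append]
  have hlen : (xs.drop (xs.length - pvRotK off xs.length)).length = xs.length - (xs.length - pvRotK off xs.length) := by simp
  rw [dif_neg (by omega)]
  rw [List.getElem_take]
  congr 1
  omega

theorem pvNatModTwo {a n : Nat} (h : a < 2 * n) : a % n = if a < n then a else a - n := by
  split_ifs with h'
  · exact Nat.mod_eq_of_lt h'
  · rw [Nat.mod_eq_sub_mod (by omega), Nat.mod_eq_of_lt (by omega)]

theorem pvGetElem_congr {α : Type} (xs : List α) {p q : Nat} (h : p = q) (hp : p < xs.length) :
    xs[p]'hp = xs[q]'(h ▸ hp) := by subst h; rfl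

theorem getElem_pvRot_phys' {α : Type} (off : Int) (xs : List α) (p q : Nat) (hp : p < xs.length)
    (hq : q = (p + pvRotK off xs.length) % xs.length) :
    (pvRot off xs)[q]'(by rw [length_pvRot]; subst hq; exact Nat.mod_lt _ (by omega)) = xs[p] := by
  have hn : 0 < xs.length := by omega
  have hk : pvRotK off xs.length < xs.length := pvRotK_lt off hn
  have hmod := pvNatModTwo (a := p + pvRotK off xs.length) (n := xs.length) (by omega)
  have hcases : (q = p + pvRotK off xs.length ∧ p + pvRotK off xs.length < xs.length) ∨
      (q = p + pvRotK off xs.length - xs.length ∧ xs.length ≤ p + pvRotK off xs.length) := by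
    split_ifs at hmod <;> [left; right] <;> constructor <;> omega
  rcases hcases with ⟨hq1, hq2⟩ | ⟨hq1, hq2⟩
  · rw [getElem_pvRot_hi off xs q (by omega) (by omega)]
    congr 1
    omega
  · rw [getElem_pvRot_lo off xs q (by omega) (by omega)]
    congr 1
    omega

theorem getElem_pvRot_phys {α : Type} (off : Int) (xs : List α) (p : Nat) (hp : p < xs.length) :
    (pvRot off xs)[(p + pvRotK off xs.length) % xs.length]'(by
      rw [length_pvRot]; exact Nat.mod_lt _ (by omega)) = xs[p] :=
  getElem_pvRot_phys' off xs p _ hp rfl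

theorem pvRot_set {α : Type} (off : Int) (xs : List α) (p : Nat) (v : α) (hp : p < xs.length) :
    pvRot off (xs.set p v) = (pvRot off xs).set ((p + pvRotK off xs.length) % xs.length) v := by
  have hn : 0 < xs.length := by omega
  have hk : pvRotK off xs.length < xs.length := pvRotK_lt off hn
  have hq : (p + pvRotK off xs.length) % xs.length = p + pvRotK off xs.length ∧ p + pvRotK off xs.length < xs.length ∨
      (p + pvRotK off xs.length) % xs.length = p + pvRotK off xs.length - xs.length ∧ xs.length ≤ p + pvRotK off xs.length := by
    have := pvNatModTwo (a := p + pvRotK off xs.length) (n := xs.length) (by omega)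
    split_ifs at this <;> [left; right] <;> constructor <;> omega
  apply List.ext_getElem
  · simp [length_pvRot]
  · intro i h1 h2
    have hi : i < xs.length := by
      have := length_pvRot off (xs.set p v); simp at this; omega
    have hset : (xs.set p v).length = xs.length := by simp
    have hkset : pvRotK off (xs.set p v).length = pvRotK off xs.length := by rw [hset]
    rw [List.getElem_set]
    by_cases hc : i < pvRotK off xs.length
    · rw [getElem_pvRot_lo off (xs.set p v) i (by rw [hkset]; omega) (by omega)]
      rw [getElem_pvRot_lo off xs i (by omega) (by omega)]
      simp only [hset, List.getElem_set]
      split_ifs <;> (first | rfl | (exfalso; omega))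
    · rw [getElem_pvRot_hi off (xs.set p v) i (by rw [hkset]; omega) (by omega)]
      rw [getElem_pvRot_hi off xs i (by omega) (by omega)]
      simp only [hset, List.getElem_set]
      split_ifs <;> (first | rfl | (exfalso; omega))

theorem pvRot_perm {α : Type} (off : Int) (xs : List α) : (pvRot off xs).Perm xs := by
  unfold pvRot
  calc (xs.drop (xs.length - pvRotK off xs.length) ++ xs.take (xs.length - pvRotK off xs.length)).Perm
        (xs.take (xs.length - pvRotK off xs.length) ++ xs.drop (xs.length - pvRotK off xs.length)) := List.perm_append_comm
    _ = xs := List.take_append_drop _ _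

theorem pvGetD_lt {α : Type} (xs : List α) (i : Nat) (d : α) (h : i < xs.length) :
    xs.getD i d = xs[i] := by
  simp [List.getD_eq_getElem?_getD, List.getElem?_eq_getElem h]

theorem pvSwapN_perm {α : Type} [DecidableEq α] (xs : List α) (i j : Nat) (d : α)
    (hi : i < xs.length) (hj : j < xs.length) : (pvSwapN xs i j d).Perm xs := by
  rw [List.perm_iff_count]
  intro c
  unfold pvSwapN
  rw [pvGetD_lt xs i d hi, pvGetD_lt xs j d hj]
  have hij : (xs.set i (xs[j])).length = xs.length := by simp
  rw [List.count_set (by omega), List.count_set (by omega)]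
  rw [List.getElem_set]
  have hmemi : xs[i] = c → 1 ≤ xs.count c := by
    intro h; rw [← h]; exact List.count_pos_iff.mpr (List.getElem_mem hi)
  have hmemj : xs[j] = c → 1 ≤ xs.count c := by
    intro h; rw [← h]; exact List.count_pos_iff.mpr (List.getElem_mem hj)
  by_cases hij' : i = j
  · subst hij'
    split_ifs with h1 <;> simp_all
  · rw [if_neg hij']
    by_cases h1 : xs[i] = c <;> by_cases h2 : xs[j] = c <;>
      simp_all <;> omega

theorem pvSwapN_rot {α : Type} (off : Int) (xs : List α) (i j : Nat) (d : α)
    (hi : i < xs.length) (hj : j < xs.length) :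
    pvSwapN (pvRot off xs) ((i + pvRotK off xs.length) % xs.length)
      ((j + pvRotK off xs.length) % xs.length) d = pvRot off (pvSwapN xs i j d) := by
  have hn : 0 < xs.length := by omega
  have hiq : (i + pvRotK off xs.length) % xs.length < xs.length := Nat.mod_lt _ (by omega)
  have hjq : (j + pvRotK off xs.length) % xs.length < xs.length := Nat.mod_lt _ (by omega)
  unfold pvSwapN
  rw [pvGetD_lt xs i d hi, pvGetD_lt xs j d hj]
  rw [pvGetD_lt _ _ d (by rw [length_pvRot]; exact hjq),
      pvGetD_lt _ _ d (by rw [length_pvRot]; exact hiq)]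
  have hgj : (pvRot off xs)[(j + pvRotK off xs.length) % xs.length]'(by rw [length_pvRot]; exact hjq) = xs[j] := getElem_pvRot_phys off xs j hj
  have hgi : (pvRot off xs)[(i + pvRotK off xs.length) % xs.length]'(by rw [length_pvRot]; exact hiq) = xs[i] := getElem_pvRot_phys off xs i hi
  rw [hgj, hgi]
  have h1 : pvRot off (xs.set i (xs[j])) = (pvRot off xs).set ((i + pvRotK off xs.length) % xs.length) (xs[j]) := pvRot_set off xs i _ hi
  have hlen1 : (xs.set i (xs[j])).length = xs.length := by simp
  have h2 : pvRot off ((xs.set i (xs[j])).set j (xs[i])) =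
      (pvRot off (xs.set i (xs[j]))).set ((j + pvRotK off (xs.set i (xs[j])).length) % (xs.set i (xs[j])).length) (xs[i]) :=
    pvRot_set off (xs.set i (xs[j])) j _ (by omega)
  rw [h2, hlen1, h1]

theorem pvEmodNeg (i : Int) (n : Nat) (h1 : -(n : Int) ≤ i) (h2 : i < 0) :
    i % (n : Int) = i + n := by
  have h0 := Int.add_mul_emod_self_left (a := i) (b := (n : Int)) (c := 1)
  rw [mul_one] at h0
  rw [← h0, Int.emod_eq_of_lt (by omega) (by omega)]

theorem pvGetD_emod (xs : List String) (i : Int) (d : String)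
    (h1 : -(xs.length : Int) ≤ i) (h2 : i < (xs.length : Int)) :
    PySem.List.pyGetD xs i d = xs[(i % (xs.length : Int)).toNat]'(by
      have hn : 0 < xs.length := by omega
      have := Int.emod_lt_of_pos i (show (0:Int) < (xs.length : Int) by exact_mod_cast hn)
      have := Int.emod_nonneg i (show (xs.length : Int) ≠ 0 by omega)
      omega) := by
  have hn : 0 < xs.length := by omega
  by_cases hpos : 0 ≤ i
  · rw [PySem.List.pyGetD_eq_getElem xs d hpos h2]
    congr 1
    rw [Int.emod_eq_of_lt hpos h2]
  · have hneg : i < 0 := by omega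
    have hk : 0 < (-i).toNat := by omega
    have hkn : (-i).toNat ≤ xs.length := by omega
    have hi : i = -(((-i).toNat : Nat) : Int) := by omega
    conv_lhs => rw [hi]
    rw [PySem.List.pyGetD_neg_natCast xs (-i).toNat d hk hkn]
    exact pvGetElem_congr xs (by rw [pvEmodNeg i xs.length h1 hneg]; omega) _

theorem pvSetD_emod (xs : List String) (i : Int) (v : String)
    (h1 : -(xs.length : Int) ≤ i) (h2 : i < (xs.length : Int)) :
    PySem.List.pySetD xs i v = xs.set (i % (xs.length : Int)).toNat v := by
  by_cases hpos : 0 ≤ i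
  · rw [PySem.List.pySetD_of_nonneg xs v hpos]
    congr 1
    rw [Int.emod_eq_of_lt hpos h2]
  · have hneg : i < 0 := by omega
    rw [pvEmodNeg i xs.length h1 hneg]
    simp only [PySem.List.pySetD, PySem.List.pySet?, PySem.List.pyIdx?,
      if_neg (by omega : ¬ (0:Int) ≤ i), if_pos h1, Option.map_some, Option.getD_some]
    congr 1
    omega

theorem pvSwapPy_eq (ps : List String) (A B : Int)
    (hA1 : -(ps.length : Int) ≤ A) (hA2 : A < (ps.length : Int))
    (hB1 : -(ps.length : Int) ≤ B) (hB2 : B < (ps.length : Int)) :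
    pvSwapPy ps A B = pvSwapN ps (A % (ps.length : Int)).toNat (B % (ps.length : Int)).toNat "" := by
  have hn : 0 < ps.length := by omega
  have hAb : (A % (ps.length : Int)).toNat < ps.length := by
    have := Int.emod_lt_of_pos A (show (0:Int) < (ps.length : Int) by exact_mod_cast hn)
    have := Int.emod_nonneg A (show (ps.length : Int) ≠ 0 by omega)
    omega
  have hBb : (B % (ps.length : Int)).toNat < ps.length := by
    have := Int.emod_lt_of_pos B (show (0:Int) < (ps.length : Int) by exact_mod_cast hn)
    have := Int.emod_nonneg B (show (ps.length : Int) ≠ 0 by omega)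
    omega
  unfold pvSwapPy pvSwapN
  rw [pvGetD_emod ps A "" hA1 hA2, pvGetD_emod ps B "" hB1 hB2]
  rw [pvSetD_emod ps A _ hA1 hA2]
  have hlen : (ps.set (A % (ps.length : Int)).toNat (ps[(B % (ps.length : Int)).toNat])).length = ps.length := by simp
  rw [pvSetD_emod _ B _ (by rw [hlen]; exact hB1) (by rw [hlen]; exact hB2), hlen]
  rw [pvGetD_lt ps _ "" hBb, pvGetD_lt ps _ "" hAb]

theorem pvIdx_shift (off A : Int) {n : Nat} (hn : 0 < n) :
    (((A - off) % (n : Int)).toNat + pvRotK off n) % n = (A % (n : Int)).toNat := by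
  have hnz : (n : Int) ≠ 0 := by exact_mod_cast Nat.pos_iff_ne_zero.mp hn
  have h1 : 0 ≤ (A - off) % (n : Int) := Int.emod_nonneg _ hnz
  have h2 : 0 ≤ off % (n : Int) := Int.emod_nonneg _ hnz
  have key : ((A - off) % (n : Int) + off % (n : Int)) % (n : Int) = A % (n : Int) := by
    rw [← Int.add_emod]
    congr 1
    omega
  unfold pvRotK
  have : ((((A - off) % (n : Int)).toNat + (off % (n : Int)).toNat) % n : Nat) = (A % (n : Int)).toNat := by
    have hcast : (((((A - off) % (n : Int)).toNat + (off % (n : Int)).toNat) % n : Nat) : Int)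
        = ((A - off) % (n : Int) + off % (n : Int)) % (n : Int) := by
      rw [Int.natCast_mod]
      push_cast [Int.toNat_of_nonneg h1, Int.toNat_of_nonneg h2]
      rfl
    omega
  exact this

theorem pvRotK_add (off x : Int) {n : Nat} (hn : 0 < n) :
    pvRotK (off + x) n = (pvRotK off n + pvRotK x n) % n := by
  have := pvIdx_shift off (off + x) hn
  unfold pvRotK at *
  have hc : off + x - off = x := by omega
  rw [hc, Nat.add_comm] at this
  omega

theorem pvModInv {n k i : Nat} (hn : 0 < n) (hk : k < n) (hi : i < n) :
    i = ((i + (n - k)) % n + k) % n := by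
  have h1 := pvNatModTwo (a := i + (n - k)) (n := n) (by omega)
  have hq : (i + (n - k)) % n < n := by split_ifs at h1 <;> omega
  have h2 := pvNatModTwo (a := (i + (n - k)) % n + k) (n := n) (by omega)
  split_ifs at h1 h2 <;> omega

theorem pvRot_eq_of_getElem {α : Type} (off : Int) (xs ys : List α)
    (hn : 0 < xs.length) (hlen : ys.length = xs.length)
    (h : ∀ p (hp : p < xs.length),
      ys[(p + pvRotK off xs.length) % xs.length]'(by rw [hlen]; exact Nat.mod_lt _ (by omega)) = xs[p]) :
    ys = pvRot off xs := by
  have hk : pvRotK off xs.length < xs.length := pvRotK_lt off hn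
  apply List.ext_getElem
  · rw [hlen, length_pvRot]
  · intro i h1 h2
    have hi : i < xs.length := by omega
    have hp : (i + (xs.length - pvRotK off xs.length)) % xs.length < xs.length := Nat.mod_lt _ (by omega)
    have hq : i = ((i + (xs.length - pvRotK off xs.length)) % xs.length + pvRotK off xs.length) % xs.length :=
      pvModInv hn hk hi
    calc ys[i] = ys[((i + (xs.length - pvRotK off xs.length)) % xs.length + pvRotK off xs.length) % xs.length]'(by rw [hlen]; exact Nat.mod_lt _ (by omega)) := pvGetElem_congr ys hq _
      _ = xs[(i + (xs.length - pvRotK off xs.length)) % xs.length] := h _ hp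
      _ = (pvRot off xs)[i]'(by rw [length_pvRot]; omega) :=
          (getElem_pvRot_phys' off xs _ i hp hq).symm

theorem pvRot_pvRot {α : Type} (off x : Int) (xs : List α) :
    pvRot x (pvRot off xs) = pvRot (off + x) xs := by
  rcases Nat.eq_zero_or_pos xs.length with hn | hn
  · have hxs : xs = [] := List.length_eq_zero_iff.mp hn
    subst hxs; simp [pvRot]
  · have hk1 : pvRotK off xs.length < xs.length := pvRotK_lt off hn
    have hk2 : pvRotK x xs.length < xs.length := pvRotK_lt x hn
    have hk3 : pvRotK (off + x) xs.length < xs.length := pvRotK_lt (off + x) hn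
    have hadd : pvRotK (off + x) xs.length = (pvRotK off xs.length + pvRotK x xs.length) % xs.length :=
      pvRotK_add off x hn
    have hYlen : (pvRot off xs).length = xs.length := length_pvRot off xs
    have hkY : pvRotK x (pvRot off xs).length = pvRotK x xs.length := by rw [hYlen]
    apply pvRot_eq_of_getElem (off + x) xs (pvRot x (pvRot off xs)) hn
      (by rw [length_pvRot, length_pvRot])
    intro p hp
    -- index bookkeeping: (p + k3) % n = ((p + k1) % n + k2) % n
    have hp1 : (p + pvRotK off xs.length) % xs.length < xs.length := Nat.mod_lt _ (by omega)
    have hidx : (p + pvRotK (off + x) xs.length) % xs.length =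
        ((p + pvRotK off xs.length) % xs.length + pvRotK x xs.length) % xs.length := by
      have e1 := pvNatModTwo (a := p + pvRotK off xs.length) (n := xs.length) (by omega)
      have e2 := pvNatModTwo (a := pvRotK off xs.length + pvRotK x xs.length) (n := xs.length) (by omega)
      have e3 := pvNatModTwo (a := p + (pvRotK off xs.length + pvRotK x xs.length) % xs.length)
        (n := xs.length) (by split_ifs at e2 <;> omega)
      have e4 := pvNatModTwo (a := (p + pvRotK off xs.length) % xs.length + pvRotK x xs.length)
        (n := xs.length) (by split_ifs at e1 <;> omega)
      rw [hadd]
      split_ifs at e1 e2 e3 e4 <;> omega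
    calc (pvRot x (pvRot off xs))[(p + pvRotK (off + x) xs.length) % xs.length]'(by
          rw [length_pvRot, length_pvRot]; exact Nat.mod_lt _ (by omega))
        = (pvRot off xs)[(p + pvRotK off xs.length) % xs.length]'(by
          rw [length_pvRot]; exact Nat.mod_lt _ (by omega)) := by
          apply getElem_pvRot_phys' x (pvRot off xs) _ _ (by rw [hYlen]; exact hp1)
          rw [hkY, hYlen, hidx]
      _ = xs[p] := getElem_pvRot_phys off xs p hp

theorem pvRot_zero {α : Type} (xs : List α) : pvRot 0 xs = xs := by
  unfold pvRot pvRotK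
  simp [List.drop_length, List.take_length]

theorem pvSpin_eq (ps : List String) (x : Int)
    (h1 : -(ps.length : Int) ≤ x) (h2 : x ≤ (ps.length : Int)) :
    PySem.List.slice ps (some (-x)) none ++ PySem.List.slice ps none (some (-x)) = pvRot x ps := by
  rcases Nat.eq_zero_or_pos ps.length with hn | hn
  · have hps : ps = [] := List.length_eq_zero_iff.mp hn
    subst hps
    simp [PySem.List.slice, pvRot]
  · by_cases hx : 0 ≤ x
    · have hxe : x = ((x.toNat : Nat) : Int) := by omega
      by_cases hj0 : x.toNat = 0
      · have hx0 : x = 0 := by omega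
        subst hx0
        rw [show (-(0 : Int)) = ((0 : Nat) : Int) by norm_num]
        rw [PySem.List.slice_from_natCast, PySem.List.slice_to_natCast]
        unfold pvRot pvRotK
        simp
      · have hjpos : 0 < x.toNat := by omega
        conv_lhs => rw [hxe]
        rw [PySem.List.slice_from_neg_natCast ps x.toNat hjpos,
            PySem.List.slice_to_neg_natCast ps x.toNat hjpos]
        unfold pvRot pvRotK
        by_cases hjn : x.toNat = ps.length
        · have hxn : x = (ps.length : Int) := by omega
          rw [hxn, Int.emod_self]
          simp
        · have hlt : x % (ps.length : Int) = x := Int.emod_eq_of_lt hx (by omega)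
          rw [hlt]
    · have hneg : x < 0 := by omega
      have hxe : -x = (((-x).toNat : Nat) : Int) := by omega
      have hjpos : 0 < (-x).toNat := by omega
      have hjle : (-x).toNat ≤ ps.length := by omega
      conv_lhs => rw [hxe]
      rw [PySem.List.slice_from_natCast, PySem.List.slice_to_natCast]
      unfold pvRot pvRotK
      rw [pvEmodNeg x ps.length h1 hneg]
      have hk : (x + (ps.length : Int)).toNat = ps.length - (-x).toNat := by omega
      rw [hk]
      have hm : ps.length - (ps.length - (-x).toNat) = (-x).toNat := by omega
      rw [hm]

theorem pvRot_idxOf (off : Int) (xs : List String) (a : String)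
    (hnd : xs.Nodup) (ha : a ∈ xs) :
    List.idxOf a (pvRot off xs) = (List.idxOf a xs + pvRotK off xs.length) % xs.length := by
  have hp : List.idxOf a xs < xs.length := List.idxOf_lt_length_iff.mpr ha
  have hn : 0 < xs.length := by omega
  have hq : (List.idxOf a xs + pvRotK off xs.length) % xs.length < xs.length := Nat.mod_lt _ (by omega)
  have hrotnd : (pvRot off xs).Nodup := (pvRot_perm off xs).nodup_iff.mpr hnd
  have hval : (pvRot off xs)[(List.idxOf a xs + pvRotK off xs.length) % xs.length]'(by rw [length_pvRot]; exact hq) = a := by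
    rw [getElem_pvRot_phys off xs _ hp]
    exact List.getElem_idxOf hp
  calc List.idxOf a (pvRot off xs)
      = List.idxOf ((pvRot off xs)[(List.idxOf a xs + pvRotK off xs.length) % xs.length]'(by rw [length_pvRot]; exact hq)) (pvRot off xs) := by rw [hval]
    _ = (List.idxOf a xs + pvRotK off xs.length) % xs.length :=
        List.Nodup.idxOf_getElem hrotnd _ _

theorem pvIdxOf?_of_mem (xs : List String) (a : String) (ha : a ∈ xs) :
    List.idxOf? a xs = some (List.idxOf a xs) := by
  cases h : List.idxOf? a xs with
  | none =>
    exact absurd (List.idxOf?_eq_none_iff.mp h) (by simp [ha])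
  | some i =>
    rw [List.idxOf_eq_getD_idxOf?, h]
    rfl

theorem pvMod?_pos (a : Int) (n : Nat) (hn : 0 < n) :
    PySem.Int.mod? a (n : Int) = some (a % (n : Int)) := by
  unfold PySem.Int.mod?
  rw [if_neg (by exact_mod_cast Nat.pos_iff_ne_zero.mp hn)]
  rw [Int.fmod_eq_emod, if_pos (Or.inl (by exact_mod_cast Nat.zero_le n)), add_zero]

theorem pvSwapPy_natIdx (ys : List String) (i j : Nat) (hi : i < ys.length) (hj : j < ys.length) :
    pvSwapPy ys (i : Int) (j : Int) = pvSwapN ys i j "" := by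
  rw [pvSwapPy_eq ys i j (by omega) (by exact_mod_cast hi) (by omega) (by exact_mod_cast hj)]
  rw [show ((i : Int) % (ys.length : Int)).toNat = i by
        rw [Int.emod_eq_of_lt (by omega) (by exact_mod_cast hi)]; omega,
      show ((j : Int) % (ys.length : Int)).toNat = j by
        rw [Int.emod_eq_of_lt (by omega) (by exact_mod_cast hj)]; omega]

theorem pvExch_rot (off : Int) (xs : List String) (A B : Int)
    (hA1 : -(xs.length : Int) ≤ A) (hA2 : A < (xs.length : Int))
    (hB1 : -(xs.length : Int) ≤ B) (hB2 : B < (xs.length : Int)) :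
    pvSwapPy (pvRot off xs) A B =
      pvRot off (pvSwapPy xs ((A - off) % (xs.length : Int)) ((B - off) % (xs.length : Int))) ∧
    (pvSwapPy xs ((A - off) % (xs.length : Int)) ((B - off) % (xs.length : Int))).Perm xs := by
  have hn : 0 < xs.length := by omega
  have hnz : (xs.length : Int) ≠ 0 := by exact_mod_cast Nat.pos_iff_ne_zero.mp hn
  have hi1 : 0 ≤ (A - off) % (xs.length : Int) := Int.emod_nonneg _ hnz
  have hi2 : (A - off) % (xs.length : Int) < xs.length := Int.emod_lt_of_pos _ (by exact_mod_cast hn)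
  have hj1 : 0 ≤ (B - off) % (xs.length : Int) := Int.emod_nonneg _ hnz
  have hj2 : (B - off) % (xs.length : Int) < xs.length := Int.emod_lt_of_pos _ (by exact_mod_cast hn)
  have hin : pvSwapPy xs ((A - off) % (xs.length : Int)) ((B - off) % (xs.length : Int)) =
      pvSwapN xs ((A - off) % (xs.length : Int)).toNat ((B - off) % (xs.length : Int)).toNat "" := by
    rw [pvSwapPy_eq xs _ _ (by omega) hi2 (by omega) hj2]
    rw [Int.emod_emod_of_dvd _ dvd_rfl, Int.emod_emod_of_dvd _ dvd_rfl]
  have hitn : ((A - off) % (xs.length : Int)).toNat < xs.length := by omega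
  have hjtn : ((B - off) % (xs.length : Int)).toNat < xs.length := by omega
  constructor
  · have hL : pvSwapPy (pvRot off xs) A B =
        pvSwapN (pvRot off xs) ((A % (xs.length : Int)).toNat) ((B % (xs.length : Int)).toNat) "" := by
      rw [pvSwapPy_eq (pvRot off xs) A B (by rw [length_pvRot]; exact hA1) (by rw [length_pvRot]; exact hA2)
        (by rw [length_pvRot]; exact hB1) (by rw [length_pvRot]; exact hB2), length_pvRot]
    rw [hL, hin]
    rw [show (A % (xs.length : Int)).toNat =
          (((A - off) % (xs.length : Int)).toNat + pvRotK off xs.length) % xs.length from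
        (pvIdx_shift off A hn).symm,
        show (B % (xs.length : Int)).toNat =
          (((B - off) % (xs.length : Int)).toNat + pvRotK off xs.length) % xs.length from
        (pvIdx_shift off B hn).symm]
    exact pvSwapN_rot off xs _ _ "" hitn hjtn
  · rw [hin]
    exact pvSwapN_perm xs _ _ "" hitn hjtn

theorem pvStep_inv (programs : List String) (move : String) (off : Int) (xs : List String)
    (hok : pvMoveOK programs move = true)
    (hnd : pvHeadIs move 'p' = true → programs.Nodup)
    (hperm : xs.Perm programs) :
    pvStepA (pvRot off xs) move = pvRot (pvStepB (off, xs) move).1 (pvStepB (off, xs) move).2 ∧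
      (pvStepB (off, xs) move).2.Perm programs := by
  have hlen : xs.length = programs.length := hperm.length_eq
  have hpslen : (pvRot off xs).length = xs.length := length_pvRot off xs
  unfold pvMoveOK at hok
  cases h0 : PySem.Str.pyGet? move 0 with
  | none => rw [h0] at hok; simp at hok
  | some c =>
    rw [h0] at hok
    simp only [Option.isSome_some, Bool.true_and] at hok
    have hB : ∀ d : Char, pvHeadIs move d = (c == d) := by
      intro d; unfold pvHeadIs; rw [h0]; rfl
    by_cases hcs : c = 's'
    · subst hcs
      have hS : pvHeadIs move 's' = true := by rw [hB]; rfl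
      have hX : pvHeadIs move 'x' = false := by rw [hB]; rfl
      have hP : pvHeadIs move 'p' = false := by rw [hB]; rfl
      rw [hS, if_pos rfl] at hok
      cases hx : PySem.Int.ofStr? (pvRest move) with
      | none => rw [hx] at hok; simp at hok
      | some x =>
        rw [hx] at hok
        simp only [decide_eq_true_eq] at hok
        have hb1 : -(xs.length : Int) ≤ x := by rw [hlen]; exact hok.1
        have hb2 : x ≤ (xs.length : Int) := by rw [hlen]; exact hok.2
        have eB : pvStepB (off, xs) move = (off + x, xs) := by
          unfold pvStepB; rw [hS, hx, if_pos rfl]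
        have eSpin : pvSpinA (pvRot off xs) move =
            PySem.List.slice (pvRot off xs) (some (-x)) none ++
              PySem.List.slice (pvRot off xs) none (some (-x)) := by
          unfold pvSpinA; rw [hS, hx, if_pos rfl]
        have eExch : ∀ ps, pvExchA ps move = ps := by
          intro ps; unfold pvExchA; rw [hX, if_neg (by simp)]
        have ePart : ∀ ps, pvPartA ps move = ps := by
          intro ps; unfold pvPartA; rw [hP, if_neg (by simp)]
        rw [eB]
        refine ⟨?_, hperm⟩
        unfold pvStepA
        rw [eSpin, eExch, ePart]
        rw [pvSpin_eq (pvRot off xs) x (by rw [hpslen]; exact hb1) (by rw [hpslen]; exact hb2)]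
        exact pvRot_pvRot off x xs
    · by_cases hcx : c = 'x'
      · subst hcx
        have hS : pvHeadIs move 's' = false := by rw [hB]; rfl
        have hX : pvHeadIs move 'x' = true := by rw [hB]; rfl
        have hP : pvHeadIs move 'p' = false := by rw [hB]; rfl
        rw [hS, if_neg (by simp), hX, if_pos rfl] at hok
        cases hsp : PySem.Str.split? (pvRest move) "/" with
        | none => rw [hsp] at hok; simp at hok
        | some parts =>
          rw [hsp] at hok
          cases parts with
          | nil => simp at hok
          | cons a t =>
            cases t with
            | nil => simp at hok
            | cons b t2 =>
              cases t2 with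
              | cons c3 t3 => simp at hok
              | nil =>
                dsimp only at hok
                cases hA : PySem.Int.ofStr? a with
                | none => rw [hA] at hok; simp at hok
                | some A =>
                cases hBi : PySem.Int.ofStr? b with
                | none => rw [hA, hBi] at hok; simp at hok
                | some B =>
                  rw [hA, hBi] at hok
                  dsimp only at hok
                  simp only [decide_eq_true_eq] at hok
                  obtain ⟨hA1, hA2, hB1, hB2⟩ := hok
                  have hA1' : -(xs.length : Int) ≤ A := by rw [hlen]; exact hA1
                  have hA2' : A < (xs.length : Int) := by rw [hlen]; exact hA2
                  have hB1' : -(xs.length : Int) ≤ B := by rw [hlen]; exact hB1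
                  have hB2' : B < (xs.length : Int) := by rw [hlen]; exact hB2
                  have hn : 0 < xs.length := by omega
                  have eB : pvStepB (off, xs) move =
                      (off, pvSwapPy xs ((A - off) % (xs.length : Int)) ((B - off) % (xs.length : Int))) := by
                    unfold pvStepB
                    rw [hS, if_neg (by simp), hX, if_pos rfl, hsp]
                    dsimp only
                    rw [hA, hBi]
                    dsimp only
                    rw [pvMod?_pos (A - off) xs.length hn, pvMod?_pos (B - off) xs.length hn]
                  have eSpin : ∀ ps, pvSpinA ps move = ps := by
                    intro ps; unfold pvSpinA; rw [hS, if_neg (by simp)]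
                  have ePart : ∀ ps, pvPartA ps move = ps := by
                    intro ps; unfold pvPartA; rw [hP, if_neg (by simp)]
                  have eExch : pvExchA (pvRot off xs) move = pvSwapPy (pvRot off xs) A B := by
                    unfold pvExchA
                    rw [hX, if_pos rfl, hsp]
                    dsimp only
                    rw [hA, hBi]
                  have hcore := pvExch_rot off xs A B hA1' hA2' hB1' hB2'
                  rw [eB]
                  refine ⟨?_, hcore.2.trans hperm⟩
                  unfold pvStepA
                  rw [eSpin, eExch, ePart]
                  exact hcore.1
      · by_cases hcp : c = 'p'
        · subst hcp
          have hS : pvHeadIs move 's' = false := by rw [hB]; rfl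
          have hX : pvHeadIs move 'x' = false := by rw [hB]; rfl
          have hP : pvHeadIs move 'p' = true := by rw [hB]; rfl
          have hndxs : xs.Nodup := (hperm.nodup_iff).mpr (hnd hP)
          rw [hS, if_neg (by simp), hX, if_neg (by simp), hP, if_pos rfl] at hok
          cases hsp : PySem.Str.split? (pvRest move) "/" with
          | none => rw [hsp] at hok; simp at hok
          | some parts =>
            rw [hsp] at hok
            cases parts with
            | nil => simp at hok
            | cons a t =>
              cases t with
              | nil => simp at hok
              | cons b t2 =>
                cases t2 with
                | cons c3 t3 => simp at hok
                | nil =>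
                  dsimp only at hok
                  simp only [Bool.and_eq_true, List.contains_iff_mem] at hok
                  obtain ⟨ha, hb⟩ := hok
                  have hamem : a ∈ xs := hperm.mem_iff.mpr ha
                  have hbmem : b ∈ xs := hperm.mem_iff.mpr hb
                  have hn : 0 < xs.length := List.length_pos_of_mem hamem
                  have hpa : List.idxOf a xs < xs.length := List.idxOf_lt_length_iff.mpr hamem
                  have hpb : List.idxOf b xs < xs.length := List.idxOf_lt_length_iff.mpr hbmem
                  have hia : PySem.List.index? xs a = some (List.idxOf a xs) := by
                    rw [PySem.List.index?_eq_idxOf?]; exact pvIdxOf?_of_mem xs a hamem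
                  have hib : PySem.List.index? xs b = some (List.idxOf b xs) := by
                    rw [PySem.List.index?_eq_idxOf?]; exact pvIdxOf?_of_mem xs b hbmem
                  have hIA : PySem.List.index? (pvRot off xs) a = some (List.idxOf a (pvRot off xs)) := by
                    rw [PySem.List.index?_eq_idxOf?]
                    exact pvIdxOf?_of_mem _ a ((pvRot_perm off xs).mem_iff.mpr hamem)
                  have hIB : PySem.List.index? (pvRot off xs) b = some (List.idxOf b (pvRot off xs)) := by
                    rw [PySem.List.index?_eq_idxOf?]
                    exact pvIdxOf?_of_mem _ b ((pvRot_perm off xs).mem_iff.mpr hbmem)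
                  have eB : pvStepB (off, xs) move =
                      (off, pvSwapPy xs ((List.idxOf a xs : Nat) : Int) ((List.idxOf b xs : Nat) : Int)) := by
                    unfold pvStepB
                    rw [hS, if_neg (by simp), hX, if_neg (by simp), hP, if_pos rfl, hsp]
                    dsimp only
                    rw [hia, hib]
                  have eSpin : ∀ ps, pvSpinA ps move = ps := by
                    intro ps; unfold pvSpinA; rw [hS, if_neg (by simp)]
                  have eExch : ∀ ps, pvExchA ps move = ps := by
                    intro ps; unfold pvExchA; rw [hX, if_neg (by simp)]
                  have ePart : pvPartA (pvRot off xs) move =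
                      pvSwapPy (pvRot off xs) ((List.idxOf a (pvRot off xs) : Nat) : Int)
                        ((List.idxOf b (pvRot off xs) : Nat) : Int) := by
                    unfold pvPartA
                    rw [hP, if_pos rfl, hsp]
                    dsimp only
                    rw [hIA, hIB]
                  rw [eB]
                  constructor
                  · unfold pvStepA
                    rw [eSpin, eExch, ePart]
                    rw [pvRot_idxOf off xs a hndxs hamem, pvRot_idxOf off xs b hndxs hbmem]
                    rw [pvSwapPy_natIdx (pvRot off xs) _ _
                        (by rw [hpslen]; exact Nat.mod_lt _ (by omega))
                        (by rw [hpslen]; exact Nat.mod_lt _ (by omega))]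
                    rw [pvSwapPy_natIdx xs _ _ hpa hpb]
                    exact pvSwapN_rot off xs _ _ "" hpa hpb
                  · rw [pvSwapPy_natIdx xs _ _ hpa hpb]
                    exact (pvSwapN_perm xs _ _ "" hpa hpb).trans hperm
        · -- any other letter: both sides are no-ops
          have hS : pvHeadIs move 's' = false := by rw [hB]; simp [hcs]
          have hX : pvHeadIs move 'x' = false := by rw [hB]; simp [hcx]
          have hP : pvHeadIs move 'p' = false := by rw [hB]; simp [hcp]
          have eB : pvStepB (off, xs) move = (off, xs) := by
            unfold pvStepB; rw [hS, if_neg (by simp), hX, if_neg (by simp), hP, if_neg (by simp)]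
          have eSpin : ∀ ps, pvSpinA ps move = ps := by
            intro ps; unfold pvSpinA; rw [hS, if_neg (by simp)]
          have eExch : ∀ ps, pvExchA ps move = ps := by
            intro ps; unfold pvExchA; rw [hX, if_neg (by simp)]
          have ePart : ∀ ps, pvPartA ps move = ps := by
            intro ps; unfold pvPartA; rw [hP, if_neg (by simp)]
          rw [eB]
          refine ⟨?_, hperm⟩
          unfold pvStepA
          rw [eSpin, eExch, ePart]

theorem pvFold_inv (programs : List String) (moves : List String) (off : Int) (xs : List String)
    (hok : ∀ m ∈ moves, pvMoveOK programs m = true)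
    (hnd : (moves.any fun m => pvHeadIs m 'p') = true → programs.Nodup)
    (hperm : xs.Perm programs) :
    List.foldl pvStepA (pvRot off xs) moves =
      pvRot (List.foldl pvStepB (off, xs) moves).1 (List.foldl pvStepB (off, xs) moves).2 ∧
      (List.foldl pvStepB (off, xs) moves).2.Perm programs := by
  induction moves generalizing off xs with
  | nil => exact ⟨rfl, hperm⟩
  | cons m rest ih =>
    have hm : pvMoveOK programs m = true := hok m (by simp)
    have hndm : pvHeadIs m 'p' = true → programs.Nodup := by
      intro h
      exact hnd (by simp only [List.any_cons, h, Bool.true_or])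
    have hstep := pvStep_inv programs m off xs hm hndm hperm
    have hrest : ∀ m' ∈ rest, pvMoveOK programs m' = true := fun m' hm' => hok m' (by simp [hm'])
    have hndr : (rest.any fun m => pvHeadIs m 'p') = true → programs.Nodup := by
      intro h
      exact hnd (by simp only [List.any_cons, h, Bool.or_true])
    have hmain := ih ((pvStepB (off, xs) m).1) ((pvStepB (off, xs) m).2) hrest hndr hstep.2
    simp only [List.foldl_cons]
    rw [hstep.1]
    exact hmain

-- ===== VERDICT (by name: the statement is the Claim_ definition above) =====
theorem pvRot_emod (off : Int) (xs : List String) (_hn : 0 < xs.length) :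
    pvRot (off % (xs.length : Int)) xs = pvRot off xs := by
  unfold pvRot pvRotK
  rw [Int.emod_emod_of_dvd _ dvd_rfl]

theorem programs_dance_spec : Claim_equal_programs_dance := by
  unfold Claim_equal_programs_dance
  intro moves programs _hdom hpre
  unfold Spec_programs_dance programs_dance programs_dance_alt
  obtain ⟨hok, hnd⟩ := hpre
  have h := pvFold_inv programs moves 0 programs hok hnd (List.Perm.refl _)
  rw [pvRot_zero] at h
  rw [h.1]
  congr 1
  by_cases hxs : (List.foldl pvStepB (0, programs) moves).2.isEmpty
  · have hnil : (List.foldl pvStepB (0, programs) moves).2 = [] := List.isEmpty_iff.mp hxs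
    rw [if_pos hxs, hnil]
    unfold pvRot
    simp
  · rw [if_neg hxs]
    have hn : 0 < (List.foldl pvStepB (0, programs) moves).2.length := by
      rcases hx2 : (List.foldl pvStepB (0, programs) moves).2 with _ | ⟨y, ys⟩
      · rw [hx2] at hxs; simp at hxs
      · simp
    have hmod : PySem.Int.mod (List.foldl pvStepB (0, programs) moves).1
        ((List.foldl pvStepB (0, programs) moves).2.length : Int) =
        (List.foldl pvStepB (0, programs) moves).1 % ((List.foldl pvStepB (0, programs) moves).2.length : Int) :=
      PySem.Int.mod_eq_emod_of_pos (by exact_mod_cast hn)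
    rw [hmod]
    by_cases hk : (List.foldl pvStepB (0, programs) moves).1 %
        ((List.foldl pvStepB (0, programs) moves).2.length : Int) = 0
    · rw [if_neg (by simp [hk])]
      unfold pvRot pvRotK
      rw [hk]
      simp
    · rw [if_pos hk]
      have hk1 : 0 ≤ (List.foldl pvStepB (0, programs) moves).1 %
          ((List.foldl pvStepB (0, programs) moves).2.length : Int) :=
        Int.emod_nonneg _ (by exact_mod_cast Nat.pos_iff_ne_zero.mp hn)
      have hk2 : (List.foldl pvStepB (0, programs) moves).1 %
          ((List.foldl pvStepB (0, programs) moves).2.length : Int) <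
          ((List.foldl pvStepB (0, programs) moves).2.length : Int) :=
        Int.emod_lt_of_pos _ (by exact_mod_cast hn)
      rw [pvSpin_eq _ _ (by omega) (by omega)]
      exact (pvRot_emod _ _ hn).symm
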